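-- pv_equiv track=rewrite | github.com/NREL/BUTTER-Empirical-Deep-Learning-Experimental-Framework | src/dmp/util/recompress_model_data.py | split_monotonically_increasing
-- ===== SOURCE A (Python) =====
-- def split_monotonically_increasing(tuples):
--     if not tuples:
--         return []
--
--     current_sublists = None
--     result = []
--
--     for i, current_tuple in enumerate(tuples):
--         prev_src, prev_dst = tuples[i - 1]
--         current_src, current_dst = tuples[i]
--
--         if i == 0 or any(
--             (
--                 previous_value >= current_value
--                 for previous_value, current_value in zip(tuples[i - 1], current_tuple)
--             )
--         ):
--             current_sublists = ([], [])
--             result.append(current_sublists)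
--
--         for sublist, value in zip(current_sublists, current_tuple):  # type: ignore
--             sublist.append(value)
--
--     return result
-- ===== SOURCE B (Python) =====
-- def split_monotonically_increasing(tuples):
--     result = []
--     n = len(tuples)
--     i = 0
--     while i < n:
--         # inner scan: find the end of the run starting at i
--         j = i + 1
--         while j < n:
--             (prev_src, prev_dst), (cur_src, cur_dst) = tuples[j - 1], tuples[j]
--             if prev_src >= cur_src or prev_dst >= cur_dst:
--                 break
--             j += 1
--         run = tuples[i:j]
--         result.append(([s for s, d in run], [d for s, d in run]))
--         i = j
--     return result
-- ===== Notes on version B (the rewrite author's own statement) =====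
-- stated objective: alternative
-- what changed: A does one enumerate pass over the elements, re-indexing tuples[i-1] and mutating the last appended pair of column lists in place; B is a run-at-a-time nested loop: an outer loop over runs whose inner scan finds the end index of the current run, then slices the run out and builds its two column lists with comprehensions.
import Mathlib
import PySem

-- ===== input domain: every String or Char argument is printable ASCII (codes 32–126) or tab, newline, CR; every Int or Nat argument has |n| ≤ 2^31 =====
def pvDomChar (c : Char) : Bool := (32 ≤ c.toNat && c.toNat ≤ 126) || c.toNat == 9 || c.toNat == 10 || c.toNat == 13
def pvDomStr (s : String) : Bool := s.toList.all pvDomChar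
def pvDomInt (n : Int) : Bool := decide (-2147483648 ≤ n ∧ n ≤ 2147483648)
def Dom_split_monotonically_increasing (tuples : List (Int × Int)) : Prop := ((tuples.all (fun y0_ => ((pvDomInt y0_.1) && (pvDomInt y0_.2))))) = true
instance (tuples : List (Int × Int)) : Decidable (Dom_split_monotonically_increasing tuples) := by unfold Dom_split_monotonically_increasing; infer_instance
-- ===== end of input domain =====

-- B replaces A's single enumerate pass (which mutates the last appended pair of column lists
-- in place) by a run-at-a-time nested loop: an inner scan finds where the current run ends,
-- the run is sliced out and its column lists built by comprehensions; objective: alternative.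

-- ===== PORT A =====
-- append v's components to the last run's column lists (Python mutates current_sublists, the
-- last element appended to result)
def pvAppendLast (res : List (List Int × List Int)) (v : Int × Int) : List (List Int × List Int) :=
  match res with
  | [] => []
  | [x] => [(x.1 ++ [v.1], x.2 ++ [v.2])]
  | x :: xs => x :: pvAppendLast xs v

-- the 'for i, current_tuple in enumerate(tuples)' loop, as recursion with the index counter
def pvLoopA (full : List (Int × Int)) : Nat → List (Int × Int) → List (List Int × List Int) → List (List Int × List Int)
  | _, [], result => result
  | i, t :: rest, result =>
      -- tuples[i-1]; always in range for nonempty tuples (i = 0 gives index -1, Python's last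
      -- element), so .getD is never taken; the unused unpackings prev_src/…/current_dst succeed
      let prev : Int × Int := (PySem.List.pyGet? full ((i : Int) - 1)).getD (0, 0)
      -- 'i == 0 or any(p >= c for p, c in zip(tuples[i-1], current_tuple))'
      let result := if i = 0 ∨ prev.1 ≥ t.1 ∨ prev.2 ≥ t.2 then result ++ [([], [])] else result
      pvLoopA full (i + 1) rest (pvAppendLast result t)

def split_monotonically_increasing (tuples : List (Int × Int)) : List (List Int × List Int) :=
  if tuples = [] then [] else pvLoopA tuples 0 tuples []

-- ===== PORT B =====
-- the inner 'while j < n: … break … j += 1' loop: the index where the run that is still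
-- open at j ends; fuel only makes the loop total (ts.length steps always suffice) and
-- getD is never taken: both indices are in range when read
def pvRunEnd (ts : List (Int × Int)) : Nat → Nat → Nat
  | 0, j => j
  | fuel + 1, j =>
    if j < ts.length then
      let prev : Int × Int := (PySem.List.pyGet? ts ((j : Int) - 1)).getD (0, 0)
      let cur : Int × Int := (PySem.List.pyGet? ts ((j : Int))).getD (0, 0)
      if prev.1 ≥ cur.1 ∨ prev.2 ≥ cur.2 then j else pvRunEnd ts fuel (j + 1)
    else j

-- the outer 'while i < n' loop over runs, accumulating result (fuel: totality guard only)
def pvOuter (ts : List (Int × Int)) : Nat → Nat → List (List Int × List Int) → List (List Int × List Int)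
  | 0, _, res => res
  | fuel + 1, i, res =>
    if i < ts.length then
      let j := pvRunEnd ts ts.length (i + 1)
      let run := PySem.List.slice ts (some (i : Int)) (some (j : Int))    -- tuples[i:j]
      pvOuter ts fuel j (res ++ [(run.map Prod.fst, run.map Prod.snd)])
    else res

def split_monotonically_increasing_alt (tuples : List (Int × Int)) : List (List Int × List Int) :=
  pvOuter tuples tuples.length 0 []

-- ===== PRECONDITION & SPEC =====
def Spec_split_monotonically_increasing (tuples : List (Int × Int)) (out : List (List Int × List Int)) : Prop := out = split_monotonically_increasing_alt tuples
instance (tuples : List (Int × Int)) (out : List (List Int × List Int)) : Decidable (Spec_split_monotonically_increasing tuples out) := by unfold Spec_split_monotonically_increasing; infer_instance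

-- ===== CLAIM (what is proved, stated in full; the proofs are below) =====
def Claim_equal_split_monotonically_increasing : Prop := ∀ (tuples : List (Int × Int)), Dom_split_monotonically_increasing tuples → Spec_split_monotonically_increasing tuples (split_monotonically_increasing tuples)

-- ===== LEMMAS AND PROOFS =====

-- reference decomposition both ports are reduced to: runs as lists of tuples
def pvRuns : List (Int × Int) → Int × Int → List (Int × Int) → List (List (Int × Int))
  | [], _, cur => [cur]
  | t :: rest, prev, cur =>
      if prev.1 ≥ t.1 ∨ prev.2 ≥ t.2 then cur :: pvRuns rest t [t]
      else pvRuns rest t (cur ++ [t])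

def pvCols (run : List (Int × Int)) : List Int × List Int :=
  run.foldl (fun acc t => (acc.1 ++ [t.1], acc.2 ++ [t.2])) ([], [])

-- length of the strictly componentwise increasing run continuing after prev
def pvRunLen : Int × Int → List (Int × Int) → Nat
  | _, [] => 0
  | prev, t :: rest => if prev.1 ≥ t.1 ∨ prev.2 ≥ t.2 then 0 else 1 + pvRunLen t rest

def pvTailRuns : List (Int × Int) → List (List (Int × Int))
  | [] => []
  | u :: us => pvRuns us u [u]

theorem pvAppendLast_append (l : List (List Int × List Int)) (x : List Int × List Int) (v : Int × Int) :
    pvAppendLast (l ++ [x]) v = l ++ [(x.1 ++ [v.1], x.2 ++ [v.2])] := by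
  induction l with
  | nil => rfl
  | cons a l ih =>
    cases l with
    | nil => simp [pvAppendLast]
    | cons b l => simp [pvAppendLast] at ih ⊢; exact ih

theorem pvCols_append (cur : List (Int × Int)) (t : Int × Int) :
    pvCols (cur ++ [t]) = ((pvCols cur).1 ++ [t.1], (pvCols cur).2 ++ [t.2]) := by
  simp [pvCols, List.foldl_append]

theorem pvCols_foldl (l : List (Int × Int)) :
    ∀ acc : List Int × List Int,
      l.foldl (fun acc t => (acc.1 ++ [t.1], acc.2 ++ [t.2])) acc
        = (acc.1 ++ l.map Prod.fst, acc.2 ++ l.map Prod.snd) := by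
  induction l with
  | nil => intro acc; simp
  | cons t rest ih => intro acc; simp [List.foldl_cons, ih]

theorem pvCols_eq (l : List (Int × Int)) : pvCols l = (l.map Prod.fst, l.map Prod.snd) := by
  simpa using pvCols_foldl l ([], [])

theorem pvLoopA_eq (full : List (Int × Int)) (pending : List (Int × Int)) :
    ∀ (j : Nat) (prev : Int × Int) (rs : List (List (Int × Int))) (cur : List (Int × Int)),
      0 < j → PySem.List.pyGet? full ((j : Int) - 1) = some prev → full.drop j = pending →
      pvLoopA full j pending (rs.map pvCols ++ [pvCols cur])
        = rs.map pvCols ++ (pvRuns pending prev cur).map pvCols := by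
  induction pending with
  | nil => intro j prev rs cur _ _ _; simp [pvLoopA, pvRuns]
  | cons t rest ih =>
    intro j prev rs cur hj hget hdrop
    have hjget : PySem.List.pyGet? full (((j + 1 : Nat) : Int) - 1) = some t := by
      have h1 : full[j]? = some t := by
        have := (List.getElem?_drop (xs := full) (i := j) (j := 0)).symm
        simpa [hdrop] using this
      have : PySem.List.pyGet? full ((j : Int)) = some t := by
        simpa [PySem.List.pyGet?_natCast] using h1
      simpa using this
    have hdrop' : full.drop (j + 1) = rest := by
      have : full.drop (j + 1) = (full.drop j).drop 1 := by
        rw [List.drop_drop]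
      simp [this, hdrop]
    have hjne : ¬ (j = 0) := Nat.pos_iff_ne_zero.mp hj
    by_cases hbr : prev.1 ≥ t.1 ∨ prev.2 ≥ t.2
    · have : pvLoopA full j (t :: rest) (rs.map pvCols ++ [pvCols cur])
          = pvLoopA full (j + 1) rest (((rs ++ [cur]).map pvCols) ++ [pvCols [t]]) := by
        simp only [pvLoopA, hget, Option.getD_some, if_pos (Or.inr hbr)]
        congr 1
        rw [pvAppendLast_append]
        simp [pvCols]
      rw [this, ih (j + 1) t (rs ++ [cur]) [t] (Nat.succ_pos j) hjget hdrop']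
      simp [pvRuns, if_pos hbr]
    · have : pvLoopA full j (t :: rest) (rs.map pvCols ++ [pvCols cur])
          = pvLoopA full (j + 1) rest (rs.map pvCols ++ [pvCols (cur ++ [t])]) := by
        simp only [pvLoopA, hget, Option.getD_some]
        rw [if_neg (by tauto), pvAppendLast_append, pvCols_append]
      rw [this, ih (j + 1) t rs (cur ++ [t]) (Nat.succ_pos j) hjget hdrop']
      simp [pvRuns, if_neg hbr]

theorem pvRuns_split (rest : List (Int × Int)) :
    ∀ (prev : Int × Int) (acc : List (Int × Int)),
      pvRuns rest prev acc
        = (acc ++ rest.take (pvRunLen prev rest)) :: pvTailRuns (rest.drop (pvRunLen prev rest)) := by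
  induction rest with
  | nil => intro prev acc; simp [pvRuns, pvRunLen, pvTailRuns]
  | cons t rest ih =>
    intro prev acc
    by_cases hbr : prev.1 ≥ t.1 ∨ prev.2 ≥ t.2
    · simp [pvRuns, hbr, pvRunLen, pvTailRuns]
    · have h1 : pvRunLen prev (t :: rest) = 1 + pvRunLen t rest := by
        simp [pvRunLen, hbr]
      simp only [pvRuns, if_neg hbr, h1]
      rw [ih t (acc ++ [t])]
      have : (t :: rest).take (1 + pvRunLen t rest) = t :: rest.take (pvRunLen t rest) := by
        simp [Nat.add_comm 1 (pvRunLen t rest), List.take_succ_cons]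
      rw [this]
      have : (t :: rest).drop (1 + pvRunLen t rest) = rest.drop (pvRunLen t rest) := by
        simp [Nat.add_comm 1 (pvRunLen t rest), List.drop_succ_cons]
      rw [this]
      simp

theorem pvRunEnd_eq (ts : List (Int × Int)) (suffix : List (Int × Int)) :
    ∀ (fuel j : Nat) (prev : Int × Int), suffix.length ≤ fuel → 1 ≤ j →
      ts.drop j = suffix → ts[j - 1]? = some prev →
      pvRunEnd ts fuel j = j + pvRunLen prev suffix := by
  induction suffix generalizing ts with
  | nil =>
    intro fuel j prev _ hj hdrop _
    have hlen : ts.length ≤ j := by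
      have := List.drop_eq_nil_iff.mp hdrop; omega
    cases fuel with
    | zero => simp [pvRunEnd, pvRunLen]
    | succ f => simp [pvRunEnd, Nat.not_lt.mpr hlen, pvRunLen]
  | cons t rest ih =>
    intro fuel j prev hfuel hj hdrop hprev
    obtain ⟨f, rfl⟩ : ∃ f, fuel = f + 1 := ⟨fuel - 1, by simp at hfuel; omega⟩
    have hjt : ts[j]? = some t := by
      have := (List.getElem?_drop (xs := ts) (i := j) (j := 0)).symm
      simpa [hdrop] using this
    have hjlt : j < ts.length := (List.getElem?_eq_some_iff.mp hjt).1
    have hcast : ((j : Int) - 1) = ((j - 1 : Nat) : Int) := by omega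
    have hgp : PySem.List.pyGet? ts ((j : Int) - 1) = some prev := by
      rw [hcast]; simpa [PySem.List.pyGet?_natCast] using hprev
    have hgc : PySem.List.pyGet? ts ((j : Int)) = some t := by
      simpa [PySem.List.pyGet?_natCast] using hjt
    show (if j < ts.length then _ else j) = _
    simp only [if_pos hjlt, hgp, hgc, Option.getD_some]
    by_cases hbr : prev.1 ≥ t.1 ∨ prev.2 ≥ t.2
    · simp [pvRunLen, hbr]
    · rw [if_neg hbr]
      have hdrop' : ts.drop (j + 1) = rest := by
        have : ts.drop (j + 1) = (ts.drop j).drop 1 := by rw [List.drop_drop]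
        simp [this, hdrop]
      have hprev' : ts[(j + 1) - 1]? = some t := by simpa using hjt
      rw [ih ts f (j + 1) t (by simp at hfuel; omega) (by omega) hdrop' hprev']
      simp [pvRunLen, hbr]; omega

theorem pvOuter_eq (ts : List (Int × Int)) :
    ∀ (fuel : Nat) (suffix : List (Int × Int)) (i : Nat) (res : List (List Int × List Int)),
      suffix.length ≤ fuel → ts.drop i = suffix →
      pvOuter ts fuel i res = res ++ (pvTailRuns suffix).map pvCols := by
  intro fuel
  induction fuel with
  | zero =>
    intro suffix i res hN hdrop
    have : suffix = [] := List.length_eq_zero_iff.mp (by omega)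
    subst this
    simp [pvOuter, pvTailRuns]
  | succ N ih =>
    intro suffix i res hN hdrop
    cases suffix with
    | nil =>
      have hlen : ts.length ≤ i := by
        have := List.drop_eq_nil_iff.mp hdrop; omega
      simp [pvOuter, Nat.not_lt.mpr hlen, pvTailRuns]
    | cons t rest =>
      have hit : ts[i]? = some t := by
        have := (List.getElem?_drop (xs := ts) (i := i) (j := 0)).symm
        simpa [hdrop] using this
      have hilt : i < ts.length := (List.getElem?_eq_some_iff.mp hit).1
      have hdrop1 : ts.drop (i + 1) = rest := by
        have : ts.drop (i + 1) = (ts.drop i).drop 1 := by rw [List.drop_drop]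
        simp [this, hdrop]
      have hprev : ts[(i + 1) - 1]? = some t := by simpa using hit
      set k := pvRunLen t rest with hk
      have hrlen : rest.length ≤ ts.length := by
        rw [← hdrop1]; simp
      have hje : pvRunEnd ts ts.length (i + 1) = (i + 1) + k :=
        pvRunEnd_eq ts rest ts.length (i + 1) t hrlen (by omega) hdrop1 hprev
      show (if i < ts.length then _ else res) = _
      simp only [if_pos hilt, hje]
      have hslice : PySem.List.slice ts (some (i : Int)) (some (((i + 1) + k : Nat) : Int))
          = t :: rest.take k := by
        rw [PySem.List.slice_natCast]
        have h1 : (i + 1) + k - i = 1 + k := by omega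
        rw [h1, hdrop]
        simp [Nat.add_comm 1 k, List.take_succ_cons]
      have hdropj : ts.drop ((i + 1) + k) = rest.drop k := by
        have : ts.drop ((i + 1) + k) = (ts.drop (i + 1)).drop k := by
          rw [List.drop_drop]
        simp [this, hdrop1]
      have hlen2 : (rest.drop k).length ≤ N := by
        simp only [List.length_drop]
        have := hN; simp at this; omega
      rw [hslice, ih (rest.drop k) ((i + 1) + k) _ hlen2 hdropj]
      have hruns : pvTailRuns (t :: rest) = (t :: rest.take k) :: pvTailRuns (rest.drop k) := by
        show pvRuns rest t [t] = _
        rw [pvRuns_split rest t [t]]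
        simp [hk]
      rw [hruns]
      simp [pvCols_eq]

-- ===== VERDICT (by name: the statement is the Claim_ definition above) =====
theorem split_monotonically_increasing_spec : Claim_equal_split_monotonically_increasing := by
  intro tuples _
  unfold Spec_split_monotonically_increasing
  have hB : split_monotonically_increasing_alt tuples = (pvTailRuns tuples).map pvCols := by
    simpa using pvOuter_eq tuples tuples.length tuples 0 [] (le_refl _) (by simp)
  cases tuples with
  | nil => rw [hB]; rfl
  | cons t rest =>
    rw [hB]
    have hstep : split_monotonically_increasing (t :: rest)
        = pvLoopA (t :: rest) 1 rest ([].map pvCols ++ [pvCols [t]]) := by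
      simp [split_monotonically_increasing, pvLoopA, pvAppendLast, pvCols]
    rw [hstep, pvLoopA_eq (t :: rest) rest 1 t [] [t] Nat.one_pos (by simp) (by simp)]
    simp [pvTailRuns]
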